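-- pv_equiv track=rewrite | github.com/cutehammond772/problem-solving-archive | 백준/Gold/3020. 개똥벌레/개똥벌레.py | solve
-- ===== SOURCE A (Python) =====
-- INF = 200001
--
-- def solve(H, walls):
-- 	result, count = INF, 0
-- 	current = 0
--
-- 	for x in range(H):
-- 		current += walls[x]
--
-- 		if result == current:
-- 			count += 1
-- 		elif result > current:
-- 			result, count = current, 1
--
-- 	return result, count
-- ===== SOURCE B (Python) =====
-- INF = 200001
--
-- def solve(H, walls):
--     # Build the full prefix-sum table first, then reduce it twice:
--     # min over the sentinel-prepended table, then count of that minimum.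
--     prefixes = []
--     total = 0
--     for x in range(H):
--         total += walls[x]
--         prefixes.append(total)
--     result = min([INF] + prefixes)
--     return result, prefixes.count(result)
-- ===== Notes on version B (the rewrite author's own statement) =====
-- stated objective: alternative
-- what changed: The single tracking loop with min/count branch logic is replaced by building the full prefix-sum table first and then performing two separate reductions: min over the sentinel-prepended table, then counting occurrences of that minimum.
import Mathlib
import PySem

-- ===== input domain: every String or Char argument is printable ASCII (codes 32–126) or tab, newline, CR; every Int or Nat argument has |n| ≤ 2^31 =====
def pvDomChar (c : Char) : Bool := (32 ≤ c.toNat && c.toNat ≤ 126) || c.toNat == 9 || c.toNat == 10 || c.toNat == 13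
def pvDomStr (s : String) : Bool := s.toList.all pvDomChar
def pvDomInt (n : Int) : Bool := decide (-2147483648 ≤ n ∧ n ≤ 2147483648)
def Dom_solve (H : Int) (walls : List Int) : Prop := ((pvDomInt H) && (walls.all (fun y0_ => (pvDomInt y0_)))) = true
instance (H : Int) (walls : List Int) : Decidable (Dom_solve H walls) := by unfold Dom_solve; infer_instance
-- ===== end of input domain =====

-- B builds the prefix-sum table first, then reduces with min and count; same answer as A's
-- single tracking loop on every input inside Pre_solve.

-- ===== PORT A =====
-- one tracking loop over range(H), state (result, count, current); walls[x] is pyGetD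
-- (the default 0 is never read inside Pre_solve: there every index is in range)
def solve (H : Int) (walls : List Int) : Int × Int :=
  let s := (PySem.List.pyRange 0 H 1).foldl (fun (s : Int × Int × Int) x =>
    let current := s.2.2 + PySem.List.pyGetD walls x 0
    if s.1 = current then (s.1, s.2.1 + 1, current)
    else if s.1 > current then (current, 1, current)
    else (s.1, s.2.1, current)) (200001, 0, 0)
  (s.1, s.2.1)

-- ===== PORT B =====
-- table-building loop over range(H), state (total, prefixes); walls[x] is pyGetD
-- (the default 0 is never read inside Pre_solve: there every index is in range)
def solve_alt (H : Int) (walls : List Int) : Int × Int :=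
  let p := (PySem.List.pyRange 0 H 1).foldl (fun (s : Int × List Int) x =>
    let total := s.1 + PySem.List.pyGetD walls x 0
    (total, s.2 ++ [total])) (0, ([] : List Int))
  let result := (PySem.List.min? ((200001 : Int) :: p.2) (fun y => y)).getD 0
  (result, (PySem.List.count p.2 result : Int))

-- ===== PRECONDITION & SPEC =====
-- Pre_ excludes exactly the inputs where A raises IndexError (walls[x] with H > len(walls)); B raises there too.
def Pre_solve (H : Int) (walls : List Int) : Prop := H ≤ (walls.length : Int)
instance (H : Int) (walls : List Int) : Decidable (Pre_solve H walls) := by unfold Pre_solve; infer_instance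
def pvWitness_solve : Int × List Int := (3, [1, -2, 5])

def Spec_solve (H : Int) (walls : List Int) (out : Int × Int) : Prop := out = solve_alt H walls
instance (H : Int) (walls : List Int) (out : Int × Int) : Decidable (Spec_solve H walls out) := by unfold Spec_solve; infer_instance

-- ===== CLAIM (what is proved, stated in full; the proofs are below) =====
def Claim_equal_solve : Prop := ∀ (H : Int) (walls : List Int), Dom_solve H walls → Pre_solve H walls → Spec_solve H walls (solve H walls)

-- ===== LEMMAS AND PROOFS =====

-- the prefix-sum table of l starting from running total cur
def prefs (cur : Int) : List Int → List Int
  | [] => []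
  | v :: t => (cur + v) :: prefs (cur + v) t

-- B's table-building loop (as a fold over the wall list) produces exactly the prefix-sum table
lemma loopB (l : List Int) (t : Int) (acc : List Int) :
    l.foldl (fun (s : Int × List Int) v => (s.1 + v, s.2 ++ [s.1 + v])) (t, acc)
      = (t + l.sum, acc ++ prefs t l) := by
  induction l generalizing t acc with
  | nil => simp [prefs]
  | cons v l ih =>
    simp only [List.foldl_cons, prefs, List.sum_cons, ih (t + v) (acc ++ [t + v])]
    rw [Prod.mk.injEq]
    exact ⟨by ring, by simp⟩

lemma foldl_min_le (a : Int) (t : List Int) : t.foldl min a ≤ a := by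
  induction t generalizing a with
  | nil => simp
  | cons x t ih => exact le_trans (ih (min a x)) (min_le_left a x)

-- A's tracking loop computes the fold-min of the prefix table and its occurrence count
lemma loopA (l : List Int) (r c cur : Int) :
    l.foldl (fun (s : Int × Int × Int) x =>
        let current := s.2.2 + x
        if s.1 = current then (s.1, s.2.1 + 1, current)
        else if s.1 > current then (current, 1, current)
        else (s.1, s.2.1, current)) (r, c, cur)
      = ((prefs cur l).foldl min r,
         (if (prefs cur l).foldl min r < r then 0 else c) + ((prefs cur l).count ((prefs cur l).foldl min r) : Int),
         cur + l.sum) := by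
  induction l generalizing r c cur with
  | nil => simp [prefs]
  | cons v l ih =>
    simp only [List.foldl_cons, prefs, List.sum_cons]
    by_cases h1 : r = cur + v
    · simp only [if_pos h1, ih]
      have hm : min r (cur + v) = r := by omega
      simp only [hm]
      set m := (prefs (cur + v) l).foldl min r with hmdef
      have hle : m ≤ r := foldl_min_le r _
      rw [Prod.mk.injEq, Prod.mk.injEq]
      refine ⟨rfl, ?_, by ring⟩
      by_cases h2 : m < r
      · have hne : ¬ ((cur + v) = m) := by omega
        simp [h2, hne]
      · have heq : (cur + v) = m := by omega
        simp [h2, heq]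
        omega
    · simp only [if_neg h1]
      by_cases h2 : r > cur + v
      · simp only [if_pos h2, ih]
        have hm : min r (cur + v) = cur + v := by omega
        simp only [hm]
        set m := (prefs (cur + v) l).foldl min (cur + v) with hmdef
        have hle : m ≤ cur + v := foldl_min_le _ _
        have hlt : m < r := by omega
        rw [Prod.mk.injEq, Prod.mk.injEq]
        refine ⟨rfl, ?_, by ring⟩
        rw [if_pos hlt]
        by_cases h3 : m < cur + v
        · have hne : ¬ ((cur + v) = m) := by omega
          simp [h3, hne]
        · have heq : (cur + v) = m := by omega
          simp [heq]
          omega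
      · simp only [if_neg h2, ih]
        have hm : min r (cur + v) = r := by omega
        simp only [hm]
        set m := (prefs (cur + v) l).foldl min r with hmdef
        have hle : m ≤ r := foldl_min_le r _
        have hne : ¬ ((cur + v) = m) := by omega
        rw [Prod.mk.injEq, Prod.mk.injEq]
        refine ⟨rfl, ?_, by ring⟩
        simp [hne]

-- inside Pre_, a fold over range(H) reading walls[x] equals the fold over the first H walls
lemma fold_range_take {σ : Type} (H : Int) (walls : List Int) (h0 : 0 ≤ H)
    (hP : H ≤ (walls.length : Int)) (f : σ → Int → σ) (init : σ) :
    (PySem.List.pyRange 0 H 1).foldl (fun s x => f s (PySem.List.pyGetD walls x 0)) init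
      = (walls.take H.toNat).foldl f init := by
  have hlen : ((walls.take H.toNat).length : Int) = H := by
    simp [List.length_take]; omega
  conv_lhs => rw [show H = ((walls.take H.toNat).length : Int) from hlen.symm]
  rw [← PySem.List.foldl_pyRange_zero_pyGetD' (walls.take H.toNat) 0 f init]
  apply PySem.List.foldl_congr_mem
  intro acc x hx
  rw [PySem.List.mem_pyRange_one] at hx
  rw [hlen] at hx
  have hx1 : x < ((walls.take H.toNat).length : Int) := by omega
  have hx2 : x < (walls.length : Int) := by omega
  rw [PySem.List.pyGetD_eq_getElem walls 0 hx.1 hx2,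
      PySem.List.pyGetD_eq_getElem (walls.take H.toNat) 0 hx.1 hx1]
  rw [List.getElem_take]

-- ===== VERDICT (by name: the statement is the Claim_ definition above) =====
theorem solve_spec : Claim_equal_solve := by
  intro H walls _ hP
  unfold Spec_solve solve solve_alt
  unfold Pre_solve at hP
  by_cases h0 : 0 ≤ H
  · have hA := fold_range_take H walls h0 hP (fun (s : Int × Int × Int) v =>
      let current := s.2.2 + v
      if s.1 = current then (s.1, s.2.1 + 1, current)
      else if s.1 > current then (current, 1, current)
      else (s.1, s.2.1, current)) (200001, 0, 0)
    have hB := fold_range_take H walls h0 hP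
      (fun (s : Int × List Int) v => (s.1 + v, s.2 ++ [s.1 + v])) (0, ([] : List Int))
    simp only [] at hA hB
    rw [hA, hB]
    simp only [loopA, loopB, PySem.List.min?_id_cons, PySem.List.count_eq, Option.getD_some,
      zero_add, ite_self, List.nil_append]
  · have hnil : PySem.List.pyRange 0 H 1 = [] := PySem.List.pyRange_one_eq_nil (by omega)
    simp [hnil, PySem.List.min?_id_cons, PySem.List.count_eq]
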